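-- pv_equiv track=rewrite | github.com/xuminchen/SimonOpenPlatform | subprojects/_shared/unified_runner_core.py | build_run_list
-- ===== SOURCE A (Python) =====
-- from typing import Dict, List, Tuple
--
-- TaskMap = Dict[str, Dict[str, str]]
--
-- ProfileMap = Dict[str, List[str]]
--
-- def unique_preserve_order(items: List[str]) -> List[str]:
--     result = []
--     seen = set()
--     for item in items:
--         if item not in seen:
--             seen.add(item)
--             result.append(item)
--     return result
--
-- def _validate_task_ids(task_ids: List[str], tasks: TaskMap) -> None:
--     for task_id in task_ids:
--         if task_id not in tasks:
--             raise ValueError("Unknown task id: {0}".format(task_id))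
--
-- def build_run_list(profile: str, include_tasks: List[str], skip_tasks: List[str], tasks: TaskMap, profiles: ProfileMap) -> List[str]:
--     if profile not in profiles:
--         raise ValueError("Unknown profile: {0}".format(profile))
--
--     run_list = list(profiles[profile])
--     if include_tasks:
--         run_list.extend(include_tasks)
--
--     run_list = unique_preserve_order(run_list)
--
--     _validate_task_ids(run_list, tasks)
--
--     if skip_tasks:
--         skip_set = set(skip_tasks)
--         run_list = [task_id for task_id in run_list if task_id not in skip_set]
--
--     return run_list
-- ===== SOURCE B (Python) =====
-- def build_run_list(profile, include_tasks, skip_tasks, tasks, profiles):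
--     if profile not in profiles:
--         raise ValueError("Unknown profile: {0}".format(profile))
--     combined = list(profiles[profile]) + list(include_tasks)
--     for task_id in combined:
--         if task_id not in tasks:
--             raise ValueError("Unknown task id: {0}".format(task_id))
--     # Dedup by repeatedly taking the head of a shrinking worklist and deleting
--     # all of its later duplicates from the worklist; no seen-set is ever built.
--     result = []
--     remaining = combined
--     while remaining:
--         head = remaining[0]
--         if head not in skip_tasks:
--             result.append(head)
--         remaining = [t for t in remaining[1:] if t != head]
--     return result
-- ===== Notes on version B (the rewrite author's own statement) =====
-- stated objective: alternative
-- what changed: Replaces A's seen-set dedup pass, separate validation helper and skip-filter comprehension with an up-front validation loop followed by a head-extraction worklist: repeatedly take the first element of a shrinking worklist, emit it unless skipped, and delete its remaining duplicates from the worklist, so no seen-set or per-element membership bookkeeping exists.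
import Mathlib
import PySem

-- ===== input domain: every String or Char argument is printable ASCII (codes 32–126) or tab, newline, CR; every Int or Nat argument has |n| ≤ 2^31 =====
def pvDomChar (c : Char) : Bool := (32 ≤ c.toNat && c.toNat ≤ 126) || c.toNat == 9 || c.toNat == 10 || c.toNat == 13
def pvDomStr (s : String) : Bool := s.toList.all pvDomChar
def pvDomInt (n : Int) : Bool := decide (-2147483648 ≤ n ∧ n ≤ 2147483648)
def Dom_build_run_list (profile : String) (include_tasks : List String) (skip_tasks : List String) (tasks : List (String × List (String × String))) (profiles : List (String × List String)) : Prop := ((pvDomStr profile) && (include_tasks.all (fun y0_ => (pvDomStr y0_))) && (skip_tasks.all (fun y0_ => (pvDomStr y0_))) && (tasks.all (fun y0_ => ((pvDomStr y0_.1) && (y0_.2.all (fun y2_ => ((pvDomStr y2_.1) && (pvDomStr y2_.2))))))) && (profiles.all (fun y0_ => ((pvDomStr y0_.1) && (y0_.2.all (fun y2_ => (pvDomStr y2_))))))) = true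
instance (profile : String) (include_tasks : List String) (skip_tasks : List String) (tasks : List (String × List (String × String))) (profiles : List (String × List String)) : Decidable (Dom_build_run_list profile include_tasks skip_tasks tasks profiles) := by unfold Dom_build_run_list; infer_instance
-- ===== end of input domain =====

-- B replaces A's seen-set dedup + validation helper + skip filter with an up-front validation
-- loop and a head-extraction worklist that deletes later duplicates; equal return values on Pre_.
-- ===== PORT A =====
-- helper unique_preserve_order: loop appending unseen items, tracking a 'seen' set
def unique_preserve_order (items : List String) : List String :=
  (items.foldl
    (fun (st : List String × PySem.Set String) item =>
      if st.2.contains item then st else (st.1 ++ [item], st.2.add item))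
    ([], PySem.Set.empty)).1

-- helper _validate_task_ids: True = raises ValueError (some id not in tasks)
def validate_fails (task_ids : List String) (tasks : PySem.Dict String (List (String × String))) : Bool :=
  task_ids.any (fun task_id => !(tasks.contains task_id))

def build_run_list (profile : String) (include_tasks : List String) (skip_tasks : List String) (tasks : List (String × List (String × String))) (profiles : List (String × List String)) : List String :=
  let profilesD := PySem.Dict.mk profiles
  if !(profilesD.contains profile) then []  -- raise ValueError: excluded by Pre_
  else
    let run_list0 := profilesD.getD profile []
    let run_list1 := if !include_tasks.isEmpty then run_list0 ++ include_tasks else run_list0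
    let run_list2 := unique_preserve_order run_list1
    if validate_fails run_list2 (PySem.Dict.mk tasks) then []  -- raise ValueError: excluded by Pre_
    else if !skip_tasks.isEmpty then
      let skip_set := PySem.Set.ofList skip_tasks
      run_list2.filter (fun task_id => !(skip_set.contains task_id))
    else run_list2

-- ===== PORT B =====
-- the while loop: emit head unless skipped, drop its duplicates from the worklist
def alt_loop (skip_tasks : List String) (result : List String) (remaining : List String) : List String :=
  match remaining with
  | [] => result
  | head :: tail =>
      alt_loop skip_tasks
        (if !(skip_tasks.contains head) then result ++ [head] else result)
        (tail.filter (fun t => t != head))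
termination_by remaining.length
decreasing_by simpa using Nat.lt_succ_of_le (List.length_filter_le _ _)

def build_run_list_alt (profile : String) (include_tasks : List String) (skip_tasks : List String) (tasks : List (String × List (String × String))) (profiles : List (String × List String)) : List String :=
  let profilesD := PySem.Dict.mk profiles
  if !(profilesD.contains profile) then []  -- raise ValueError: excluded by Pre_
  else
    let combined := profilesD.getD profile [] ++ include_tasks
    if combined.any (fun t => !((PySem.Dict.mk tasks).contains t)) then []  -- raise ValueError: excluded by Pre_
    else alt_loop skip_tasks [] combined

-- ===== PRECONDITION & SPEC =====
-- Pre_ excludes exactly the inputs on which A raises ValueError: an unknown profile, or a task id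
-- (in the profile's list or in include_tasks) that is not a key of tasks.
def Pre_build_run_list (profile : String) (include_tasks : List String) (skip_tasks : List String) (tasks : List (String × List (String × String))) (profiles : List (String × List String)) : Prop :=
  (PySem.Dict.mk profiles).contains profile = true ∧
  ∀ t ∈ (PySem.Dict.mk profiles).getD profile [] ++ include_tasks,
    (PySem.Dict.mk tasks).contains t = true
instance (profile : String) (include_tasks : List String) (skip_tasks : List String) (tasks : List (String × List (String × String))) (profiles : List (String × List String)) : Decidable (Pre_build_run_list profile include_tasks skip_tasks tasks profiles) := by unfold Pre_build_run_list; infer_instance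
def pvWitness_build_run_list : String × List String × List String × (List (String × List (String × String))) × (List (String × List String)) :=
  ("p", ["b", "a"], ["c"], [("a", []), ("b", []), ("c", [])], [("p", ["a", "c", "a"])])
def Spec_build_run_list (profile : String) (include_tasks : List String) (skip_tasks : List String) (tasks : List (String × List (String × String))) (profiles : List (String × List String)) (out : List String) : Prop := out = build_run_list_alt profile include_tasks skip_tasks tasks profiles
instance (profile : String) (include_tasks : List String) (skip_tasks : List String) (tasks : List (String × List (String × String))) (profiles : List (String × List String)) (out : List String) : Decidable (Spec_build_run_list profile include_tasks skip_tasks tasks profiles out) := by unfold Spec_build_run_list; infer_instance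

-- ===== CLAIM =====
def Claim_equal_build_run_list : Prop := ∀ (profile : String) (include_tasks : List String) (skip_tasks : List String) (tasks : List (String × List (String × String))) (profiles : List (String × List String)), Dom_build_run_list profile include_tasks skip_tasks tasks profiles → Pre_build_run_list profile include_tasks skip_tasks tasks profiles → Spec_build_run_list profile include_tasks skip_tasks tasks profiles (build_run_list profile include_tasks skip_tasks tasks profiles)

-- ===== LEMMAS AND PROOFS =====

-- pure first-occurrence dedup by head extraction (proof-side common form of both programs)
def dedup_rec : List String → List String
  | [] => []
  | head :: tail => head :: dedup_rec (tail.filter (fun t => t != head))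
termination_by items => items.length
decreasing_by simpa using Nat.lt_succ_of_le (List.length_filter_le _ _)

-- A's dedup fold, with its state exposed
def upoFold (items : List String) (st : List String × PySem.Set String) : List String × PySem.Set String :=
  items.foldl
    (fun st item => if st.2.contains item then st else (st.1 ++ [item], st.2.add item)) st

theorem pred_add (seen : PySem.Set String) (a : String) :
    ∀ x, (!((seen.add a).contains x)) = ((x != a) && !(seen.contains x)) := by
  intro x
  by_cases hxa : x = a <;> by_cases hxs : x ∈ seen <;>
    simp [hxa, hxs, PySem.Set.mem_add]

-- A's fold result = res ++ head-extraction dedup of the not-yet-seen items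
theorem upoFold_eq_dedup_rec (items : List String) (res : List String) (seen : PySem.Set String) :
    (upoFold items (res, seen)).1 =
      res ++ dedup_rec (items.filter (fun x => !(seen.contains x))) := by
  induction items generalizing res seen with
  | nil => simp [upoFold, dedup_rec]
  | cons a l ih =>
    rw [upoFold, List.foldl_cons]
    by_cases h : seen.contains a = true
    · have hm : a ∈ seen := by simpa using h
      have hf : List.filter (fun x => !(seen.contains x)) (a :: l) =
          List.filter (fun x => !(seen.contains x)) l := by
        rw [List.filter_cons]; simp [hm]
      rw [hf, if_pos h]
      have := ih res seen
      rw [upoFold] at this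
      exact this
    · have hm : a ∉ seen := by simpa using h
      have hf : List.filter (fun x => !(seen.contains x)) (a :: l) =
          a :: List.filter (fun x => !(seen.contains x)) l := by
        rw [List.filter_cons]; simp [hm]
      rw [hf, if_neg h, dedup_rec]
      have := ih (res ++ [a]) (seen.add a)
      rw [upoFold] at this
      rw [this]
      have hff : l.filter (fun x => !((seen.add a).contains x)) =
          (l.filter (fun x => !(seen.contains x))).filter (fun t => t != a) := by
        rw [List.filter_filter]
        exact List.filter_congr (fun x _ => pred_add seen a x)
      rw [hff]
      simp

-- B's worklist loop = res ++ (head-extraction dedup, then the skip filter)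
theorem alt_loop_eq (skip : List String) (res : List String) (items : List String) :
    alt_loop skip res items =
      res ++ (dedup_rec items).filter (fun t => !(skip.contains t)) := by
  induction items using dedup_rec.induct generalizing res with
  | case1 => simp [alt_loop, dedup_rec]
  | case2 head tail ih =>
    have ih' : ∀ r, alt_loop skip r (tail.filter (fun t => t != head)) =
        r ++ (dedup_rec (tail.filter (fun t => t != head))).filter (fun t => !(skip.contains t)) := by
      intro r; simpa using ih r
    rw [alt_loop, dedup_rec, List.filter_cons, ih']
    by_cases h : head ∈ skip <;> simp [h]

theorem mem_dedup_rec {x : String} (l : List String) (h : x ∈ dedup_rec l) : x ∈ l := by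
  induction l using dedup_rec.induct with
  | case1 => simp [dedup_rec] at h
  | case2 head tail ih =>
    rw [dedup_rec] at h
    rcases List.mem_cons.mp h with h | h
    · simp [h]
    · have ih' := by simpa using ih
      exact List.mem_cons_of_mem _ (ih' h).1

-- ===== VERDICT =====
theorem build_run_list_spec : Claim_equal_build_run_list := by
  intro profile include_tasks skip_tasks tasks profiles _ hpre
  obtain ⟨hprof, hids⟩ := hpre
  unfold Spec_build_run_list build_run_list build_run_list_alt
  simp only [hprof, Bool.not_true, Bool.false_eq_true, if_false]
  set base := (PySem.Dict.mk profiles).getD profile [] with hbase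
  have hrun1 : (if !include_tasks.isEmpty then base ++ include_tasks else base) =
      base ++ include_tasks := by
    by_cases h : include_tasks.isEmpty <;> simp_all [List.isEmpty_iff]
  rw [hrun1]
  have hupo : unique_preserve_order (base ++ include_tasks) =
      dedup_rec (base ++ include_tasks) := by
    unfold unique_preserve_order
    have := upoFold_eq_dedup_rec (base ++ include_tasks) [] PySem.Set.empty
    rw [upoFold] at this
    rw [this]
    simp [PySem.Set.empty]
  have hvalid : validate_fails (unique_preserve_order (base ++ include_tasks))
      (PySem.Dict.mk tasks) = false := by
    unfold validate_fails
    simp only [List.any_eq_false]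
    intro t ht
    rw [hupo] at ht
    simp [hids t (mem_dedup_rec _ ht)]
  rw [hvalid]
  have hvB : (base ++ include_tasks).any (fun t => !((PySem.Dict.mk tasks).contains t)) = false := by
    simp only [List.any_eq_false]
    intro t ht
    simp [hids t ht]
  simp only [hvB, Bool.false_eq_true, if_false]
  rw [alt_loop_eq, hupo]
  by_cases hsk : skip_tasks = []
  · subst hsk; simp
  · have he : skip_tasks.isEmpty = false := by simpa [List.isEmpty_iff] using hsk
    simp only [he, Bool.not_false, if_true, List.nil_append]
    exact List.filter_congr (fun t _ => by simp)
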